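-- pv_equiv track=rewrite | github.com/irom-lab/risk_calibrated_interactive_planning | model_zoo/vlm_interface.py | gen_prompt_qa
-- ===== SOURCE A (Python) =====
-- def next_alpha(s):
--     return chr((ord(s.upper())+1 - 65) % 26 + 65)
--
-- def gen_prompt_qa(num_groups=4, sorting_types=["shape", "color", "size"]):
--
--     strs = []
--     alpha_ids = []
--     alpha = "A"
--     for g in range(num_groups):
--         sg = str(g+1)
--         for st in sorting_types:
--             new_s = f"({alpha}): Group {sg} by {st}"
--             strs.append(new_s)
--             alpha = next_alpha(alpha)
--             alpha_ids.append(sg)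
--     return strs, alpha_ids
-- ===== SOURCE B (Python) =====
-- def gen_prompt_qa(num_groups=4, sorting_types=["shape", "color", "size"]):
--     n = len(sorting_types)
--     total = max(num_groups, 0) * n
--     strs = [f"({chr(65 + i % 26)}): Group {i // n + 1} by {sorting_types[i % n]}"
--             for i in range(total)]
--     alpha_ids = [str(i // n + 1) for i in range(total)]
--     return strs, alpha_ids
-- ===== Notes on version B (the rewrite author's own statement) =====
-- stated objective: simpler
-- what changed: Replaces the nested loop with a mutated alpha accumulator (and the next_alpha helper) by two comprehensions over a flat index i, computing the label as chr(65 + i % 26) and the group as i // n + 1 directly.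
import Mathlib
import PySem

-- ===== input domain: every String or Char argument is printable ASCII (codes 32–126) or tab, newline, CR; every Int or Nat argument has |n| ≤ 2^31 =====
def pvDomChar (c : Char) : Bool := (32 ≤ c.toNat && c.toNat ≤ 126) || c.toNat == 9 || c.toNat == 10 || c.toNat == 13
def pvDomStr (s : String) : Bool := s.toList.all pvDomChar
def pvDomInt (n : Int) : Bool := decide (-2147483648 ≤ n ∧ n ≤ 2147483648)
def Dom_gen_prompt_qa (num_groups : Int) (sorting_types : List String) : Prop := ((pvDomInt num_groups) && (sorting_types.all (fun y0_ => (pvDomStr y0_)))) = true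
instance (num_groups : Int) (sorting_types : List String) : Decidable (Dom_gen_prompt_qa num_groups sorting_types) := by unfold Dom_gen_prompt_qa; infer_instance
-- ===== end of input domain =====

-- B replaces A's nested loop with a mutated alpha accumulator by two comprehensions over a
-- flat index, computing each label and group id directly (objective: simpler).


-- ===== PORT A =====
-- next_alpha(s) = chr((ord(s.upper())+1 - 65) % 26 + 65); ord raises unless the string has
-- exactly one char (A only ever passes one-char strings) — the [_] match is that ord.
def next_alpha (s : String) : String :=
  match (PySem.Str.upper s).toList with
  | [c] => String.ofList [Char.ofNat ((PySem.Int.mod ((c.toNat : Int) + 1 - 65) 26 + 65).toNat)]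
  | _ => ""

def gen_prompt_qa (num_groups : Int) (sorting_types : List String) : List String × List String :=
  let fin : List String × List String × String :=
    (PySem.List.pyRange 0 num_groups 1).foldl (fun st g =>
      let sg := PySem.Int.toStr (g + 1)
      sorting_types.foldl (fun st2 stt =>
        (st2.1 ++ ["(" ++ st2.2.2 ++ "): Group " ++ sg ++ " by " ++ stt],
         st2.2.1 ++ [sg],
         next_alpha st2.2.2)) st)
      ([], [], "A")
  (fin.1, fin.2.1)

-- ===== PORT B =====
def gen_prompt_qa_alt (num_groups : Int) (sorting_types : List String) : List String × List String :=
  let n : Int := sorting_types.length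
  let total : Int := max num_groups 0 * n
  let strs := (PySem.List.pyRange 0 total 1).map (fun i =>
    "(" ++ String.ofList [Char.ofNat ((65 + PySem.Int.mod i 26).toNat)] ++ "): Group "
      ++ PySem.Int.toStr (PySem.Int.floordiv i n + 1) ++ " by "
      ++ ((PySem.List.pyGet? sorting_types (PySem.Int.mod i n)).getD ""))  -- index always in range in Source B
  let alpha_ids := (PySem.List.pyRange 0 total 1).map (fun i =>
    PySem.Int.toStr (PySem.Int.floordiv i n + 1))
  (strs, alpha_ids)

-- ===== PRECONDITION & SPEC =====
def Spec_gen_prompt_qa (num_groups : Int) (sorting_types : List String) (out : List String × List String) : Prop := out = gen_prompt_qa_alt num_groups sorting_types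
instance (num_groups : Int) (sorting_types : List String) (out : List String × List String) : Decidable (Spec_gen_prompt_qa num_groups sorting_types out) := by unfold Spec_gen_prompt_qa; infer_instance

-- ===== CLAIM (what is proved, stated in full; the proofs are below) =====
def Claim_equal_gen_prompt_qa : Prop := ∀ (num_groups : Int) (sorting_types : List String), Dom_gen_prompt_qa num_groups sorting_types → Spec_gen_prompt_qa num_groups sorting_types (gen_prompt_qa num_groups sorting_types)

-- ===== LEMMAS AND PROOFS =====

-- the label of the k-th generated item, and the closed forms of the two output lists
def pvLab (k : Nat) : String := String.ofList [Char.ofNat (65 + k % 26)]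

def pvStr (ts : List String) (k : Nat) : String :=
  "(" ++ pvLab k ++ "): Group " ++ PySem.Int.toStr (((k / ts.length : Nat) : Int) + 1)
    ++ " by " ++ ts.getD (k % ts.length) ""

def pvId (ts : List String) (k : Nat) : String :=
  PySem.Int.toStr (((k / ts.length : Nat) : Int) + 1)

lemma next_alpha_lab (k : Nat) : next_alpha (pvLab k) = pvLab (k + 1) := by
  have hmod : (k + 1) % 26 = (k % 26 + 1) % 26 := by omega
  have hm : k % 26 < 26 := Nat.mod_lt _ (by norm_num)
  unfold next_alpha pvLab
  rw [hmod]
  set m := k % 26 with hmdef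
  interval_cases m <;> decide

lemma innerA_eq (sg : String) (ts : List String) : ∀ (strs ids : List String) (k : Nat),
    ts.foldl (fun st2 stt =>
        (st2.1 ++ ["(" ++ st2.2.2 ++ "): Group " ++ sg ++ " by " ++ stt],
         st2.2.1 ++ [sg], next_alpha st2.2.2)) (strs, ids, pvLab k)
    = (strs ++ (List.range ts.length).map
         (fun j => "(" ++ pvLab (k + j) ++ "): Group " ++ sg ++ " by " ++ ts.getD j ""),
       ids ++ List.replicate ts.length sg, pvLab (k + ts.length)) := by
  induction ts with
  | nil => intro strs ids k; simp
  | cons h t ih =>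
    intro strs ids k
    simp only [List.foldl_cons, next_alpha_lab]
    rw [ih (strs ++ ["(" ++ pvLab k ++ "): Group " ++ sg ++ " by " ++ h]) (ids ++ [sg]) (k + 1)]
    simp only [Prod.mk.injEq]
    refine ⟨?_, ?_, ?_⟩
    · rw [List.length_cons, List.range_succ_eq_map, List.map_cons, List.map_map,
          List.append_assoc, List.singleton_append, List.getD_cons_zero, Nat.add_zero]
      refine congrArg (strs ++ ·) (congrArg (_ :: ·) ?_)
      exact List.map_congr_left fun j hj => by
        simp only [Function.comp_apply, List.getD_cons_succ, Nat.succ_eq_add_one]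
        rw [show k + 1 + j = k + (j + 1) by omega]
    · simp [List.replicate_succ, List.append_assoc]
    · rw [List.length_cons]
      exact congrArg pvLab (by omega)

lemma outerA_eq (ts : List String) : ∀ (N : Nat),
    (List.range N).foldl (fun st (g : Nat) =>
        ts.foldl (fun st2 stt =>
          (st2.1 ++ ["(" ++ st2.2.2 ++ "): Group " ++ PySem.Int.toStr ((g : Int) + 1) ++ " by " ++ stt],
           st2.2.1 ++ [PySem.Int.toStr ((g : Int) + 1)], next_alpha st2.2.2)) st)
      ([], [], pvLab 0)
    = ((List.range (N * ts.length)).map (pvStr ts),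
       (List.range (N * ts.length)).map (pvId ts), pvLab (N * ts.length)) := by
  intro N
  induction N with
  | zero => simp
  | succ N ih =>
    rw [List.range_succ, List.foldl_append, ih]
    simp only [List.foldl_cons, List.foldl_nil]
    rw [innerA_eq]
    have h1 : ∀ j, j < ts.length → (N * ts.length + j) / ts.length = N := fun j hj => by
      rw [mul_comm N ts.length, Nat.mul_add_div (by omega), Nat.div_eq_of_lt hj]; omega
    have h2 : ∀ j, j < ts.length → (N * ts.length + j) % ts.length = j := fun j hj => by
      rw [mul_comm N ts.length, Nat.mul_add_mod]; exact Nat.mod_eq_of_lt hj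
    have hrange : List.range ((N + 1) * ts.length)
        = List.range (N * ts.length) ++ (List.range ts.length).map (fun j => N * ts.length + j) := by
      rw [show (N + 1) * ts.length = N * ts.length + ts.length by ring, List.range_add]
    simp only [Prod.mk.injEq]
    refine ⟨?_, ?_, ?_⟩
    · rw [hrange, List.map_append, List.map_map]
      refine congrArg ((List.range (N * ts.length)).map (pvStr ts) ++ ·) ?_
      exact List.map_congr_left fun j hj => by
        simp only [List.mem_range] at hj
        simp only [Function.comp_apply, pvStr, h1 j hj, h2 j hj]
    · rw [hrange, List.map_append, List.map_map]
      refine congrArg ((List.range (N * ts.length)).map (pvId ts) ++ ·) ?_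
      refine ((List.eq_replicate_iff.mpr ⟨by simp, ?_⟩)).symm
      intro b hb
      simp only [List.mem_map, List.mem_range] at hb
      obtain ⟨j, hj, rfl⟩ := hb
      simp only [Function.comp_apply, pvId, h1 j hj]
    · exact congrArg pvLab (by ring)

lemma altB_eq (ng : Int) (ts : List String) :
    gen_prompt_qa_alt ng ts
    = ((List.range (ng.toNat * ts.length)).map (pvStr ts),
       (List.range (ng.toNat * ts.length)).map (pvId ts)) := by
  unfold gen_prompt_qa_alt
  have hmax : max ng 0 = ((ng.toNat : Nat) : Int) := by
    rcases le_total ng 0 with h | h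
    · rw [max_eq_right h]; omega
    · rw [max_eq_left h]; omega
  have htot : max ng 0 * (ts.length : Int) = ((ng.toNat * ts.length : Nat) : Int) := by
    rw [hmax]; push_cast; ring
  simp only [htot]
  rw [PySem.List.pyRange_one]
  rw [show (((ng.toNat * ts.length : Nat) : Int) - 0).toNat = ng.toNat * ts.length by omega]
  simp only [List.map_map, Prod.mk.injEq]
  refine ⟨?_, ?_⟩
  · refine List.map_congr_left fun j hj => ?_
    simp only [Function.comp_apply, zero_add, PySem.Int.mod_natCast, PySem.Int.floordiv_natCast,
      PySem.List.pyGet?_natCast]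
    rw [PySem.Int.mod_eq_emod_of_pos (by norm_num : (0:Int) < 26)]
    rw [show ((65 + (j : Int) % 26).toNat) = 65 + j % 26 by omega]
    simp only [pvStr, pvLab, List.getD_eq_getElem?_getD]
  · refine List.map_congr_left fun j hj => ?_
    simp only [Function.comp_apply, zero_add, PySem.Int.floordiv_natCast]
    rfl

-- ===== VERDICT (by name: the statement is the Claim_ definition above) =====
theorem gen_prompt_qa_spec : Claim_equal_gen_prompt_qa := by
  intro ng ts _
  simp only [Spec_gen_prompt_qa, gen_prompt_qa]
  rw [altB_eq, PySem.List.pyRange_one]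
  have hA : "A" = pvLab 0 := by decide
  simp only [List.foldl_map, hA, Int.sub_zero, zero_add]
  rw [outerA_eq ts ng.toNat]
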